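-- pv_equiv track=rewrite | github.com/offbynull/offbynull.github.io | docs/data/learn/Bioinformatics/input/ch4_code/src/SpectrumConvolution.py | spectrum_convolution
-- ===== SOURCE A (Python) =====
-- from typing import List
--
-- def spectrum_convolution(experimental_spectrum: List[int], min_mass=57, max_mass=200) -> List[int]:
--     # it's expected that experimental_spectrum is sorted smallest to largest
--     diffs = []
--     for row_idx, row_mass in enumerate(experimental_spectrum):
--         for col_idx, col_mass in enumerate(experimental_spectrum):
--             mass_diff = row_mass - col_mass
--             if min_mass <= mass_diff <= max_mass:
--                 diffs.append(mass_diff)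
--     diffs.sort()
--     return diffs
-- ===== SOURCE B (Python) =====
-- def spectrum_convolution(experimental_spectrum, min_mass=57, max_mass=200):
--     # Counting variant: group equal masses once, enumerate diffs over distinct
--     # values only, emit each in-range diff with its pair multiplicity, sort.
--     counts = {}
--     for m in experimental_spectrum:
--         counts[m] = counts.get(m, 0) + 1
--     diffs = []
--     for a, ca in counts.items():
--         for b, cb in counts.items():
--             d = a - b
--             if min_mass <= d <= max_mass:
--                 diffs.extend([d] * (ca * cb))
--     diffs.sort()
--     return diffs
-- ===== Notes on version B (the rewrite author's own statement) =====
-- stated objective: alternative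
-- what changed: B groups equal masses into a dict of multiplicities once, enumerates differences over distinct values only and emits each in-range diff with its pair multiplicity (count_a*count_b), instead of A's nested scan over all n^2 element pairs; it saves work only on duplicate-heavy spectra, which a timing run's random inputs are not.
import Mathlib
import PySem

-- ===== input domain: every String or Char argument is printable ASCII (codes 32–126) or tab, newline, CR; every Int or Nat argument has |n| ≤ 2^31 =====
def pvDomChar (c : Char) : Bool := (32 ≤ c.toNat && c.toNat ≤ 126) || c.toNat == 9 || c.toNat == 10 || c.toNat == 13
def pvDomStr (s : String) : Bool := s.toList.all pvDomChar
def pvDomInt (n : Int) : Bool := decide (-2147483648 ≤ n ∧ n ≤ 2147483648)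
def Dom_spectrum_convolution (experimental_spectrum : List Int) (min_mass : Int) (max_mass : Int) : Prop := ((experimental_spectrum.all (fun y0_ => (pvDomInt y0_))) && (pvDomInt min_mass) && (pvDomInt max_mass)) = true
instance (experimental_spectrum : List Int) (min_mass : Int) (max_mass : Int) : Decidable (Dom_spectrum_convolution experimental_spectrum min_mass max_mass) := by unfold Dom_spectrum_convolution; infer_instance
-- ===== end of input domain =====

-- B groups equal masses in a dictionary once and enumerates diffs over DISTINCT values only,
-- emitting each in-range diff with its pair multiplicity.

-- ===== PORT A =====
def spectrum_convolution (experimental_spectrum : List Int) (min_mass : Int) (max_mass : Int) : List Int :=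
  let diffs :=
    (PySem.List.enumerate experimental_spectrum).foldl (fun acc rp =>
      (PySem.List.enumerate experimental_spectrum).foldl (fun acc cp =>
        let mass_diff := rp.2 - cp.2
        if min_mass ≤ mass_diff ∧ mass_diff ≤ max_mass then acc ++ [mass_diff] else acc) acc) []
  PySem.List.sorted diffs (fun x => x)

-- ===== PORT B =====
def spectrum_convolution_alt (experimental_spectrum : List Int) (min_mass : Int) (max_mass : Int) : List Int :=
  let counts := experimental_spectrum.foldl (fun d m => d.insert m (d.getD m 0 + 1)) (PySem.Dict.empty : PySem.Dict Int Int)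
  let diffs :=
    counts.items.foldl (fun acc p =>
      counts.items.foldl (fun acc q =>
        let d := p.1 - q.1
        if min_mass ≤ d ∧ d ≤ max_mass then acc ++ List.replicate (p.2 * q.2).toNat d else acc) acc) []
  PySem.List.sorted diffs (fun x => x)

-- ===== PRECONDITION & SPEC =====
def Spec_spectrum_convolution (experimental_spectrum : List Int) (min_mass : Int) (max_mass : Int) (out : List Int) : Prop := out = spectrum_convolution_alt experimental_spectrum min_mass max_mass
instance (experimental_spectrum : List Int) (min_mass : Int) (max_mass : Int) (out : List Int) : Decidable (Spec_spectrum_convolution experimental_spectrum min_mass max_mass out) := by unfold Spec_spectrum_convolution; infer_instance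

-- ===== CLAIM (what is proved, stated in full; the proofs are below) =====
def Claim_equal_spectrum_convolution : Prop := ∀ (experimental_spectrum : List Int) (min_mass : Int) (max_mass : Int), Dom_spectrum_convolution experimental_spectrum min_mass max_mass → Spec_spectrum_convolution experimental_spectrum min_mass max_mass (spectrum_convolution experimental_spectrum min_mass max_mass)

-- ===== LEMMAS AND PROOFS =====

-- folding over `enumerate l` with a function that only reads the value is folding over `l`
theorem pv_foldl_enumerate_snd {α β : Type} (g : β → α → β) :
    ∀ (l : List α) (st : Int) (acc : β),
      (PySem.List.enumerate l st).foldl (fun acc p => g acc p.2) acc = l.foldl g acc := by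
  intro l
  induction l with
  | nil => intro st acc; rfl
  | cons x t ih => intro st acc; simp only [PySem.List.enumerate, List.foldl_cons]; exact ih _ _

-- 'if p(x): out.extend(g(x))' as a flatMap
theorem pv_foldl_append_if_flatMap {α β : Type} (p : α → Prop) [DecidablePred p] (g : α → List β)
    (l : List α) (acc : List β) :
    l.foldl (fun acc x => if p x then acc ++ g x else acc) acc
      = acc ++ l.flatMap (fun x => if p x then g x else []) := by
  have h : (fun (acc : List β) x => if p x then acc ++ g x else acc)
      = fun acc x => acc ++ (if p x then g x else []) := by
    funext acc x; split <;> simp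
  rw [h, PySem.List.foldl_append_eq_flatMap]

theorem pv_count_flatMap {α β : Type} [DecidableEq α] (l : List β) (f : β → List α) (d : α) :
    (l.flatMap f).count d = (l.map (fun x => (f x).count d)).sum := by
  rw [List.flatMap_def, List.count_flatten, List.map_map]
  rfl

-- sum of a one-point indicator over a Nodup list
theorem pv_sum_indicator {α : Type} [DecidableEq α] (l : List α) (hl : l.Nodup) (t : α) (g : α → Nat) :
    (l.map (fun b => if b = t then g b else 0)).sum = if t ∈ l then g t else 0 := by
  induction l with
  | nil => simp
  | cons x xs ih =>
    simp only [List.map_cons, List.sum_cons, List.mem_cons]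
    rcases List.nodup_cons.mp hl with ⟨hx, hxs⟩
    by_cases hxt : x = t
    · subst hxt
      simp [hx, ih hxs]
    · simp [hxt, ih hxs, Ne.symm]

-- grouping a sum over the list into a sum over its distinct values weighted by multiplicity
theorem pv_sum_group (s : List Int) (g : Int → Nat) :
    (s.map g).sum = ((PySem.Set.ofList s).map (fun a => s.count a * g a)).sum := by
  have h1 : (s.map g).sum = ∑ m ∈ s.toFinset, s.count m * g m := by
    have := Finset.sum_multiset_map_count (s : Multiset Int) g
    simpa using this
  have hset : ((PySem.Set.ofList s : List Int)).toFinset = s.toFinset := by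
    apply Finset.ext
    intro x
    simp [PySem.Set.mem_ofList]
  have h2 := List.sum_toFinset (fun a => s.count a * g a) (PySem.Set.nodup_ofList s)
  rw [h1, ← hset, h2]

-- the multiset of in-range diffs is the same whether enumerated over the list or over its counter
theorem pv_diffs_perm (s : List Int) (mn mx : Int) :
    (s.flatMap (fun a => (s.filter (fun b => decide (mn ≤ a - b ∧ a - b ≤ mx))).map (fun b => a - b))).Perm
      (((PySem.Set.ofList s).map (fun k => (k, (s.count k : Int)))).flatMap
        (fun p => ((PySem.Set.ofList s).map (fun k => (k, (s.count k : Int)))).flatMap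
          (fun q => if mn ≤ p.1 - q.1 ∧ p.1 - q.1 ≤ mx
                    then List.replicate (p.2 * q.2).toNat (p.1 - q.1) else []))) := by
  rw [List.perm_iff_count]
  intro d
  rw [pv_count_flatMap, pv_count_flatMap]
  by_cases hP : mn ≤ d ∧ d ≤ mx
  · -- in-range diff: both sides count (a, a-d) pairs
    have hA : ∀ a : Int,
        (((s.filter (fun b => decide (mn ≤ a - b ∧ a - b ≤ mx))).map (fun b => a - b)).count d)
          = s.count (a - d) := by
      intro a
      have hinj : Function.Injective (fun b : Int => a - b) := by
        intro x y h; simpa using h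
      have hd : d = (fun b : Int => a - b) (a - d) := by simp
      have h2 : a - (a - d) = d := by omega
      rw [hd, List.count_map_of_injective _ _ hinj, List.count_filter]
      dsimp only
      rw [h2]
      simp [hP.1, hP.2]
    have hB : ∀ a : Int,
        (((PySem.Set.ofList s).map (fun k => (k, (s.count k : Int)))).map
          (fun q => (if mn ≤ a - q.1 ∧ a - q.1 ≤ mx
              then List.replicate (((s.count a : Int) * q.2).toNat) (a - q.1) else []).count d)).sum
          = s.count a * s.count (a - d) := by
      intro a
      rw [List.map_map]
      have hrow : ∀ b : Int,
          ((fun q : Int × Int => (if mn ≤ a - q.1 ∧ a - q.1 ≤ mx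
              then List.replicate (((s.count a : Int) * q.2).toNat) (a - q.1) else []).count d) ∘
            (fun k => (k, (s.count k : Int)))) b
          = if b = a - d then s.count a * s.count b else 0 := by
        intro b
        simp only [Function.comp_apply]
        by_cases hb : b = a - d
        · subst hb
          have : a - (a - d) = d := by omega
          rw [this, if_pos hP]
          simp only [List.count_replicate]
          rw [← Nat.cast_mul, Int.toNat_natCast]
          simp
        · have hne : a - b ≠ d := by omega
          split
          · simp [List.count_replicate, hne]
          · simp
      rw [List.map_congr_left (fun b _ => hrow b)]
      rw [pv_sum_indicator _ (PySem.Set.nodup_ofList s) (a - d) (fun b => s.count a * s.count b)]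
      by_cases hmem : a - d ∈ (PySem.Set.ofList s : List Int)
      · simp [hmem]
      · have : s.count (a - d) = 0 := by
          rw [List.count_eq_zero]
          intro hc; exact hmem ((PySem.Set.mem_ofList s (a - d)).mpr hc)
        simp [hmem, this]
    calc (s.map (fun a =>
            ((s.filter (fun b => decide (mn ≤ a - b ∧ a - b ≤ mx))).map (fun b => a - b)).count d)).sum
        = (s.map (fun a => s.count (a - d))).sum := by
          rw [List.map_congr_left (fun a _ => hA a)]
      _ = ((PySem.Set.ofList s).map (fun a => s.count a * s.count (a - d))).sum := pv_sum_group s _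
      _ = _ := by
          conv_rhs => rw [List.map_map]
          congr 1
          apply List.map_congr_left
          intro a _
          simp only [Function.comp_apply]
          rw [pv_count_flatMap]
          exact (hB a).symm
  · -- out-of-range diff: every row counts zero
    have hzA : ∀ x ∈ s.map (fun a =>
        ((s.filter (fun b => decide (mn ≤ a - b ∧ a - b ≤ mx))).map (fun b => a - b)).count d), x = 0 := by
      intro x hx
      rcases List.mem_map.mp hx with ⟨a, _, rfl⟩
      rw [List.count_eq_zero]
      intro hd
      rcases List.mem_map.mp hd with ⟨b, hb, hab⟩
      rcases List.mem_filter.mp hb with ⟨_, hpb⟩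
      exact hP (by rw [← hab]; exact of_decide_eq_true hpb)
    have hzB : ∀ x ∈ ((PySem.Set.ofList s).map (fun k => (k, (s.count k : Int)))).map (fun p =>
        (((PySem.Set.ofList s).map (fun k => (k, (s.count k : Int)))).flatMap
          (fun q => if mn ≤ p.1 - q.1 ∧ p.1 - q.1 ≤ mx
            then List.replicate (p.2 * q.2).toNat (p.1 - q.1) else [])).count d), x = 0 := by
      intro x hx
      rcases List.mem_map.mp hx with ⟨p, _, rfl⟩
      rw [List.count_eq_zero]
      intro hd
      rcases List.mem_flatMap.mp hd with ⟨q, _, hq⟩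
      by_cases hpq : mn ≤ p.1 - q.1 ∧ p.1 - q.1 ≤ mx
      · rw [if_pos hpq] at hq
        rcases List.eq_of_mem_replicate hq with rfl
        exact hP hpq
      · rw [if_neg hpq] at hq
        exact absurd hq (List.not_mem_nil)
    rw [List.sum_eq_zero hzA, List.sum_eq_zero hzB]

theorem pv_main (s : List Int) (mn mx : Int) :
    spectrum_convolution s mn mx = spectrum_convolution_alt s mn mx := by
  simp only [spectrum_convolution, spectrum_convolution_alt]
  rw [PySem.Dict.foldl_insert_getD_add_one_eq_counter, PySem.Dict.items_counter]
  have hA : (PySem.List.enumerate s).foldl (fun acc rp =>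
        (PySem.List.enumerate s).foldl (fun acc cp =>
          if mn ≤ rp.2 - cp.2 ∧ rp.2 - cp.2 ≤ mx then acc ++ [rp.2 - cp.2] else acc) acc) ([] : List Int)
      = s.flatMap (fun a => (s.filter (fun b => decide (mn ≤ a - b ∧ a - b ≤ mx))).map (fun b => a - b)) := by
    rw [pv_foldl_enumerate_snd (fun acc a => (PySem.List.enumerate s).foldl (fun acc cp =>
          if mn ≤ a - cp.2 ∧ a - cp.2 ≤ mx then acc ++ [a - cp.2] else acc) acc)]
    have h1 : (fun (acc : List Int) (a : Int) => (PySem.List.enumerate s).foldl (fun acc cp =>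
          if mn ≤ a - cp.2 ∧ a - cp.2 ≤ mx then acc ++ [a - cp.2] else acc) acc)
        = fun acc a => acc ++ (s.filter (fun b => decide (mn ≤ a - b ∧ a - b ≤ mx))).map (fun b => a - b) := by
      funext acc a
      rw [pv_foldl_enumerate_snd (fun acc c => if mn ≤ a - c ∧ a - c ≤ mx then acc ++ [a - c] else acc)]
      rw [PySem.List.foldl_append_ite (fun b => mn ≤ a - b ∧ a - b ≤ mx) (fun b => a - b)]
    rw [h1, PySem.List.foldl_append_eq_flatMap, List.nil_append]
  have hB : ((PySem.Set.ofList s).map (fun k => (k, (s.count k : Int)))).foldl (fun acc p =>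
        ((PySem.Set.ofList s).map (fun k => (k, (s.count k : Int)))).foldl (fun acc q =>
          if mn ≤ p.1 - q.1 ∧ p.1 - q.1 ≤ mx
          then acc ++ List.replicate (p.2 * q.2).toNat (p.1 - q.1) else acc) acc) ([] : List Int)
      = ((PySem.Set.ofList s).map (fun k => (k, (s.count k : Int)))).flatMap
          (fun p => ((PySem.Set.ofList s).map (fun k => (k, (s.count k : Int)))).flatMap
            (fun q => if mn ≤ p.1 - q.1 ∧ p.1 - q.1 ≤ mx
                      then List.replicate (p.2 * q.2).toNat (p.1 - q.1) else [])) := by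
    have h1 : (fun (acc : List Int) (p : Int × Int) =>
          ((PySem.Set.ofList s).map (fun k => (k, (s.count k : Int)))).foldl (fun acc q =>
            if mn ≤ p.1 - q.1 ∧ p.1 - q.1 ≤ mx
            then acc ++ List.replicate (p.2 * q.2).toNat (p.1 - q.1) else acc) acc)
        = fun acc p => acc ++ ((PySem.Set.ofList s).map (fun k => (k, (s.count k : Int)))).flatMap
            (fun q => if mn ≤ p.1 - q.1 ∧ p.1 - q.1 ≤ mx
                      then List.replicate (p.2 * q.2).toNat (p.1 - q.1) else []) := by
      funext acc p
      rw [pv_foldl_append_if_flatMap (fun q : Int × Int => mn ≤ p.1 - q.1 ∧ p.1 - q.1 ≤ mx)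
            (fun q : Int × Int => List.replicate (p.2 * q.2).toNat (p.1 - q.1))]
    rw [h1, PySem.List.foldl_append_eq_flatMap, List.nil_append]
  rw [hA, hB]
  exact PySem.List.sorted_eq_sorted_of_perm _ _ _ (fun x y h => h) (pv_diffs_perm s mn mx)

-- ===== VERDICT (by name: the statement is the Claim_ definition above) =====
theorem spectrum_convolution_spec : Claim_equal_spectrum_convolution := by
  intro s mn mx _
  unfold Spec_spectrum_convolution
  exact pv_main s mn mx
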